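-- pv_equiv track=rewrite | github.com/alexandraback/datacollection | solutions_5706278382862336_0/Python/IBD/20141CQ1.py | sum_moves_mod2
-- ===== SOURCE A (Python) =====
-- def sum_moves_mod2(D):
-- 	BST = 10000000
-- 	for i in D :
-- 		goal = i
-- 		tmp_sum = 0
-- 		for j in D :
-- 			tmp_sum +=abs(j-i)
-- 		BST = min(BST,tmp_sum)
--
-- 	return BST
-- ===== SOURCE B (Python) =====
-- def sum_moves_mod2(D):
--     E = sorted(D)
--     n = len(E)
--     total = sum(E)
--     best = 10000000
--     left = 0
--     for k, x in enumerate(E):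
--         best = min(best, x * k - left + (total - left) - x * (n - k))
--         left += x
--     return best
-- ===== Notes on version B (the rewrite author's own statement) =====
-- stated objective: faster
-- what changed: Replaces A's quadratic double loop (recomputing the full distance sum for every candidate element) by sort + a single prefix-sum pass that computes each candidate's cost in O(1), still minimised against A's initial 10000000.
import Mathlib
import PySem

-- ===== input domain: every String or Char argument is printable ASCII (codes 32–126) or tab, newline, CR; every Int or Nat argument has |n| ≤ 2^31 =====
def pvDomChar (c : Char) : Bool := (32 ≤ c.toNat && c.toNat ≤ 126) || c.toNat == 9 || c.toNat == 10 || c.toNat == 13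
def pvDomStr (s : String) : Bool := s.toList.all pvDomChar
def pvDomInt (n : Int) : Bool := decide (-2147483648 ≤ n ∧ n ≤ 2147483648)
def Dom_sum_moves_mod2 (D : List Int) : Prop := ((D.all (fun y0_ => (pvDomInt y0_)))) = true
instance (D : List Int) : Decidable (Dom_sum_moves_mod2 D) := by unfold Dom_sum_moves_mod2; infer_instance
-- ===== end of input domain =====

-- B replaces A's quadratic scan (sum of |j-i| recomputed for every i) by sort + one
-- prefix-sum pass over the sorted list; objective: faster (O(n log n) vs O(n^2)).

-- ===== PORT A =====
def sum_moves_mod2 (D : List Int) : Int :=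
  D.foldl (fun BST i => min BST (D.foldl (fun tmp j => tmp + |j - i|) 0)) 10000000

-- ===== PORT B =====
-- the for-loop of Source B: state (k, left, best), n/total fixed
def sumMovesGo (n total : Int) : List Int → Int → Int → Int → Int
  | [], _, _, best => best
  | x :: rest, k, left, best =>
      sumMovesGo n total rest (k + 1) (left + x)
        (min best (x * k - left + (total - left) - x * (n - k)))

def sum_moves_mod2_alt (D : List Int) : Int :=
  let E := PySem.List.sorted D (fun x => x) false
  sumMovesGo (E.length : Int) E.sum E 0 0 10000000

-- ===== PRECONDITION & SPEC =====
def Spec_sum_moves_mod2 (D : List Int) (out : Int) : Prop := out = sum_moves_mod2_alt D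
instance (D : List Int) (out : Int) : Decidable (Spec_sum_moves_mod2 D out) := by unfold Spec_sum_moves_mod2; infer_instance

-- ===== CLAIM (what is proved, stated in full; the proofs are below) =====
def Claim_equal_sum_moves_mod2 : Prop := ∀ (D : List Int), Dom_sum_moves_mod2 D → Spec_sum_moves_mod2 D (sum_moves_mod2 D)

-- ===== LEMMAS AND PROOFS =====

-- total cost of meeting at x, over the multiset E
def movesCost (E : List Int) (x : Int) : Int := (E.map (fun j => |j - x|)).sum

theorem foldl_add_abs (x a : Int) (l : List Int) :
    l.foldl (fun tmp j => tmp + |j - x|) a = a + movesCost l x := by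
  induction l generalizing a with
  | nil => simp [movesCost]
  | cons y t ih =>
      simp only [List.foldl_cons, ih, movesCost, List.map_cons, List.sum_cons]
      ring

theorem cost_perm {E D : List Int} (h : E.Perm D) (x : Int) : movesCost E x = movesCost D x := by
  exact List.Perm.sum_eq (List.Perm.map _ h)

theorem foldl_min_perm (f : Int → Int) {l₁ l₂ : List Int} (h : l₁.Perm l₂) (a : Int) :
    l₁.foldl (fun b i => min b (f i)) a = l₂.foldl (fun b i => min b (f i)) a := by
  have e : ∀ (l : List Int) (a : Int), l.foldl (fun b i => min b (f i)) a = (l.map f).foldl min a := by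
    intro l; induction l with
    | nil => intro a; rfl
    | cons y t ih => intro a; simp [List.foldl_cons, ih]
  rw [e, e]
  exact (List.Perm.map f h).foldl_eq' (fun x _ y _ z => min_right_comm z x y) a

theorem sum_abs_le (x : Int) (l : List Int) (h : ∀ j ∈ l, j ≤ x) :
    (l.map (fun j => |j - x|)).sum = x * l.length - l.sum := by
  induction l with
  | nil => simp
  | cons y t ih =>
      have hy : y ≤ x := h y (by simp)
      have : |y - x| = x - y := by rw [abs_sub_comm]; exact abs_of_nonneg (by omega)
      simp only [List.map_cons, List.sum_cons, this, ih (fun j hj => h j (by simp [hj])), List.length_cons]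
      push_cast; ring

theorem sum_abs_ge (x : Int) (l : List Int) (h : ∀ j ∈ l, x ≤ j) :
    (l.map (fun j => |j - x|)).sum = l.sum - x * l.length := by
  induction l with
  | nil => simp
  | cons y t ih =>
      have hy : x ≤ y := h y (by simp)
      have : |y - x| = y - x := abs_of_nonneg (by omega)
      simp only [List.map_cons, List.sum_cons, this, ih (fun j hj => h j (by simp [hj])), List.length_cons]
      push_cast; ring

theorem go_spec (E : List Int) (hs : E.Pairwise (· ≤ ·)) :
    ∀ (suf pre : List Int) (best : Int), E = pre ++ suf →
      sumMovesGo (E.length : Int) E.sum suf (pre.length : Int) pre.sum best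
        = suf.foldl (fun b x => min b (movesCost E x)) best := by
  intro suf
  induction suf with
  | nil => intro pre best _; rfl
  | cons x rest ih =>
      intro pre best hE
      have hsplit := hs
      rw [hE, List.pairwise_append] at hsplit
      obtain ⟨_, hsr, hcross⟩ := hsplit
      have hpre : ∀ j ∈ pre, j ≤ x := fun j hj => hcross j hj x (by simp)
      have hrest : ∀ j ∈ rest, x ≤ j := by
        rw [List.pairwise_cons] at hsr; exact hsr.1
      have hcost : x * (pre.length : Int) - pre.sum + (E.sum - pre.sum)
            - x * ((E.length : Int) - (pre.length : Int)) = movesCost E x := by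
        have h1 := sum_abs_le x pre hpre
        have h2 := sum_abs_ge x rest hrest
        have hlen : (E.length : Int) = (pre.length : Int) + 1 + (rest.length : Int) := by
          rw [hE]; push_cast [List.length_append, List.length_cons]; ring
        have hsum : E.sum = pre.sum + x + rest.sum := by
          rw [hE]; simp [List.sum_append]; ring
        have hc : movesCost E x = (x * pre.length - pre.sum) + 0 + (rest.sum - x * rest.length) := by
          rw [hE]; simp only [movesCost, List.map_append, List.map_cons, List.sum_append, List.sum_cons, h1, h2]
          simp
        rw [hc, hlen, hsum]; ring
      have step := ih (pre ++ [x]) (min best (movesCost E x)) (by simp [hE])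
      simp only [List.length_append, List.length_cons, List.length_nil, List.sum_append,
        List.sum_cons, List.sum_nil] at step
      simp only [sumMovesGo, hcost, List.foldl_cons]
      rw [← step]
      push_cast; ring_nf

theorem sum_moves_mod2_spec : Claim_equal_sum_moves_mod2 := by
  intro D _
  unfold Spec_sum_moves_mod2 sum_moves_mod2 sum_moves_mod2_alt
  set E := PySem.List.sorted D (fun x => x) false with hEdef
  have hperm : E.Perm D := PySem.List.sorted_perm D (fun x => x) false
  have hpw : E.Pairwise (· ≤ ·) := PySem.List.sorted_pairwise D (fun x => x)
  -- A side: foldl of min of costs over D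
  have hA : D.foldl (fun BST i => min BST (D.foldl (fun tmp j => tmp + |j - i|) 0)) 10000000
      = D.foldl (fun b i => min b (movesCost E i)) 10000000 := by
    have : ∀ (l : List Int) (a : Int),
        l.foldl (fun BST i => min BST (D.foldl (fun tmp j => tmp + |j - i|) 0)) a
          = l.foldl (fun b i => min b (movesCost E i)) a := by
      intro l; induction l with
      | nil => intro a; rfl
      | cons y t ih =>
          intro a
          rw [List.foldl_cons, List.foldl_cons, foldl_add_abs, zero_add, cost_perm hperm y, ih]
    exact this D 10000000
  rw [hA, foldl_min_perm (movesCost E) hperm.symm 10000000]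
  exact (go_spec E hpw E [] 10000000 rfl).symm
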